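-- pv_equiv track=rewrite | github.com/brandonhippe/Advent-of-Code | 2020/python/2020_6.py | part1
-- ===== SOURCE A (Python) =====
-- from collections import defaultdict
--
-- def part1(data):
--     """ 2020 Day 6 Part 1
--
--     >>> part1(['abc', '', 'a', 'b', 'c', '', 'ab', 'ac', '', 'a', 'a', 'a', 'a', '', 'b', ''])
--     11
--     """
--
--     count = 0
--     group = defaultdict(lambda: 0)
--     inGroup = 0
--     for line in data:
--         if len(line) == 0:
--             count += len(group)
--
--             group = defaultdict(lambda: 0)
--             inGroup = 0
--             continue
--
--         inGroup += 1
--         for c in line: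
--             group[c] += 1
--
--     return count
-- ===== SOURCE B (Python) =====
-- def part1(data):
--     """ 2020 Day 6 Part 1 (two-pass: partition into groups, then aggregate)
--
--     >>> part1(['abc', '', 'a', 'b', 'c', '', 'ab', 'ac', '', 'a', 'a', 'a', 'a', '', 'b', ''])
--     11
--     """
--     groups = []
--     cur = []
--     for line in data:
--         if len(line) == 0:
--             groups.append(cur)
--             cur = []
--         else:
--             cur.append(line)
--     # a trailing group not terminated by a blank line is not counted (matches A)
--     return sum(len(set(''.join(g))) for g in groups)
-- ===== Notes on version B (the rewrite author's own statement) =====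
-- stated objective: alternative
-- what changed: B partitions the lines into blank-terminated groups in one pass and then sums len(set(joined group)) per group, instead of A's single interleaved pass that maintains a running per-character count defaultdict flushed on blank lines; dropping the per-character dict counting for a set of the joined group gives a constant-factor speedup.
import Mathlib
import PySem

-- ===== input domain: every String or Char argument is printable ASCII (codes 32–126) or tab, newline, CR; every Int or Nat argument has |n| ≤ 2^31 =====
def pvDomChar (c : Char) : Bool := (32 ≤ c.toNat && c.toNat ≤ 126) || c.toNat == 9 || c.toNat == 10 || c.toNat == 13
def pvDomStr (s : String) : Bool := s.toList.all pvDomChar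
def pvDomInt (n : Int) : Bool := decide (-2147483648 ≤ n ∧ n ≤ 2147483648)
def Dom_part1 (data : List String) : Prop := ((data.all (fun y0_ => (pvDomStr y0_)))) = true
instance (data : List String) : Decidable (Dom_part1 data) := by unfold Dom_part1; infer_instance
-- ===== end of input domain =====

-- B partitions the lines into blank-terminated groups first and aggregates per group in a
-- second pass, instead of A's single interleaved pass with a running defaultdict (alternative).


-- ===== PORT A =====
-- state: (count, group, inGroup), exactly A's three variables
def part1 (data : List String) : Int :=
  (data.foldl
    (fun (st : Int × PySem.Dict Char Int × Int) line =>
      let (count, group, inGroup) := st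
      if PySem.Str.len line = 0 then
        (count + (group.size : Int), PySem.Dict.empty, 0)
      else
        (count,
         line.toList.foldl (fun g c => g.modify c 0 (· + 1)) group,
         inGroup + 1))
    (0, PySem.Dict.empty, 0)).1

-- ===== PORT B =====
def part1_groups (data : List String) : List (List String) :=
  (data.foldl
    (fun (st : List (List String) × List String) line =>
      if PySem.Str.len line = 0 then (st.1 ++ [st.2], [])
      else (st.1, st.2 ++ [line]))
    ([], [])).1

def part1_alt (data : List String) : Int :=
  ((part1_groups data).map
    (fun g => PySem.Set.len (PySem.Set.ofList (g.map String.toList).flatten))).sum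

-- ===== PRECONDITION & SPEC =====
def Spec_part1 (data : List String) (out : Int) : Prop := out = part1_alt data
instance (data : List String) (out : Int) : Decidable (Spec_part1 data out) := by unfold Spec_part1; infer_instance

-- ===== CLAIM (what is proved, stated in full; the proofs are below) =====
def Claim_equal_part1 : Prop := ∀ (data : List String), Dom_part1 data → Spec_part1 data (part1 data)

-- ===== LEMMAS AND PROOFS =====

-- distinct-char count of a group of lines
def pvGroupLen (g : List String) : Int :=
  PySem.Set.len (PySem.Set.ofList (g.map String.toList).flatten)

theorem pvSet_ofList_append {α : Type} [BEq α] (xs ys : List α) :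
    PySem.Set.ofList (xs ++ ys) = PySem.Set.update (PySem.Set.ofList xs) ys := by
  simp [PySem.Set.ofList_eq_foldl, PySem.Set.update, List.foldl_append]

-- joint invariant: A's running count equals B's sum-so-far, and A's dict keys are
-- exactly the distinct chars of B's current partial group
theorem pvInvariant (data : List String) (count : Int) (group : PySem.Dict Char Int)
    (inGroup : Int) (groups : List (List String)) (cur : List String)
    (hc : count = (groups.map pvGroupLen).sum)
    (hk : group.keys = PySem.Set.ofList (cur.map String.toList).flatten) :
    (data.foldl
      (fun (st : Int × PySem.Dict Char Int × Int) line =>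
        let (count, group, inGroup) := st
        if PySem.Str.len line = 0 then
          (count + (group.size : Int), PySem.Dict.empty, 0)
        else
          (count,
           line.toList.foldl (fun g c => g.modify c 0 (· + 1)) group,
           inGroup + 1))
      (count, group, inGroup)).1
    =
    ((data.foldl
      (fun (st : List (List String) × List String) line =>
        if PySem.Str.len line = 0 then (st.1 ++ [st.2], [])
        else (st.1, st.2 ++ [line]))
      (groups, cur)).1.map pvGroupLen).sum := by
  induction data generalizing count group inGroup groups cur with
  | nil =>
    simpa using hc
  | cons line rest ih =>
    simp only [List.foldl_cons]
    by_cases h : PySem.Str.len line = 0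
    · simp only [h, if_true]
      apply ih
      · have hsize : (group.size : Int) = pvGroupLen cur := by
          have : group.size = group.keys.length := by
            simp [PySem.Dict.size, PySem.Dict.keys]
          rw [pvGroupLen, PySem.Set.len, this, hk]
        simp [hc, hsize]
      · simp [PySem.Dict.empty, PySem.Dict.keys, PySem.Set.ofList]
    · simp only [if_neg h]
      apply ih
      · exact hc
      · rw [PySem.Dict.keys_foldl_modify, hk, eq_comm]
        simp [pvSet_ofList_append]

-- ===== VERDICT (by name: the statement is the Claim_ definition above) =====
theorem part1_spec : Claim_equal_part1 := by
  intro data _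
  unfold Spec_part1 part1 part1_alt part1_groups
  exact pvInvariant data 0 PySem.Dict.empty 0 [] []
    (by simp) (by simp [PySem.Dict.empty, PySem.Dict.keys, PySem.Set.ofList])
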